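-- pv_equiv track=rewrite | github.com/ziyuan-shen/leetcode_algorithm_python_solution | hard/ex42.py | get_traps
-- ===== SOURCE A (Python) =====
-- def get_traps(height):
--     traps = []
--     idx = 0
--     while True:
--         while (idx<len(height)-1) and height[idx+1]>=height[idx]:
--             idx += 1
--         if idx > len(height)-3:
--             break
--         left_boundary = idx
--         while (idx<len(height)-1) and height[idx+1]<=height[idx]:
--             idx += 1
--         if idx == len(height)-1:
--             break
--         local_minimum = idx
--         while (idx<len(height)-1) and height[idx+1]>=height[idx]:
--             idx += 1
--         right_boundary = idx
--         traps.append([left_boundary, local_minimum, right_boundary])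
--     return traps
-- ===== SOURCE B (Python) =====
-- def get_traps(height):
--     n = len(height)
--     # pass 1: alternating extrema list [(index, is_up_step), ...]:
--     # first index of each maximal run of equal non-zero adjacent steps
--     ext = []
--     last = None
--     for i, (a, b) in enumerate(zip(height, height[1:])):
--         if a != b:
--             s = b > a
--             if last != s:
--                 ext.append((i, s))
--                 last = s
--     # a leading up-run has no peak before it; drop it so ext alternates peak, valley, peak, ...
--     if ext and ext[0][1]:
--         ext = ext[1:]
--     # pass 2: window of three extrema, step 2: (peak, valley, next peak or last index)
--     traps = []
--     k = 0
--     while k + 1 < len(ext):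
--         right = ext[k + 2][0] if k + 2 < len(ext) else n - 1
--         traps.append([ext[k][0], ext[k + 1][0], right])
--         k += 2
--     return traps
-- ===== Notes on version B (the rewrite author's own statement) =====
-- stated objective: alternative
-- what changed: Replaces A's interleaved three-while-loop index state machine with a two-pass decomposition: one scan over adjacent pairs builds the alternating extrema list (first index of each maximal non-flat run, leading up-run dropped), then a step-2 window of three extrema emits each [peak, valley, next-peak-or-last-index] triple.
import Mathlib
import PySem

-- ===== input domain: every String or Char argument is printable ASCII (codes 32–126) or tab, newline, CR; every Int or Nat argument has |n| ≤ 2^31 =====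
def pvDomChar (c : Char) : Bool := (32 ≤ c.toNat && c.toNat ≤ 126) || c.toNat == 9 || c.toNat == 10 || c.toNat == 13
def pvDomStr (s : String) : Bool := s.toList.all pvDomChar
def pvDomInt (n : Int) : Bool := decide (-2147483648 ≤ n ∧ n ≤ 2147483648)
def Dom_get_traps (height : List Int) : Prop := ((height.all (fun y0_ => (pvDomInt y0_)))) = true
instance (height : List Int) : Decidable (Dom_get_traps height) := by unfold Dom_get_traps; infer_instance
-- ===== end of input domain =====

-- B replaces A's interleaved three-while-loop state machine by a build-extrema-list
-- pass followed by a step-2 window pass (objective: alternative decomposition, same cost).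

-- ===== PORT A =====
-- while (idx<len-1) and height[idx+1]>=height[idx]: idx += 1   (indices stay in range, so getD is exact)
def climbA (h : List Int) (idx : Nat) : Nat :=
  if hc : idx < h.length - 1 ∧ h.getD (idx+1) 0 ≥ h.getD idx 0 then climbA h (idx+1) else idx
termination_by h.length - 1 - idx
decreasing_by exact Nat.sub_lt_sub_left hc.1 (Nat.lt_succ_self idx)

-- while (idx<len-1) and height[idx+1]<=height[idx]: idx += 1
def descA (h : List Int) (idx : Nat) : Nat :=
  if hc : idx < h.length - 1 ∧ h.getD (idx+1) 0 ≤ h.getD idx 0 then descA h (idx+1) else idx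
termination_by h.length - 1 - idx
decreasing_by exact Nat.sub_lt_sub_left hc.1 (Nat.lt_succ_self idx)

-- the outer `while True` of A, with the accumulating traps list; `fuel` bounds the
-- number of outer iterations (idx strictly increases each iteration, so len+1 suffices;
-- proved below in loopA_eq / get_traps_spec)
def loopA (h : List Int) : Nat → Nat → List (List Int) → List (List Int)
  | 0, _, acc => acc
  | fuel+1, idx, acc =>
    let i1 := climbA h idx
    if (i1 : Int) > (h.length : Int) - 3 then acc
    else
      let i2 := descA h i1
      if i2 = h.length - 1 then acc
      else
        let i3 := climbA h i2
        loopA h fuel i3 (acc ++ [[(i1 : Int), (i2 : Int), (i3 : Int)]])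

def get_traps (height : List Int) : List (List Int) := loopA height (height.length + 1) 0 []

-- ===== PORT B =====
-- fold body of B's first pass: state = (last step sign, extrema list so far)
def extStep (st : Option Bool × List (Int × Bool)) (p : Int × Int × Int) :
    Option Bool × List (Int × Bool) :=
  if p.2.2 ≠ p.2.1 then
    let s : Bool := decide (p.2.2 > p.2.1)
    if st.1 ≠ some s then (some s, st.2 ++ [(p.1, s)]) else st
  else st

-- B's second pass: while k+1 < len(ext): emit [ext[k], ext[k+1], ext[k+2] or n-1]; k += 2
def windowsB (n : Int) : List (Int × Bool) → List (List Int)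
  | p :: v :: rest =>
      [p.1, v.1, (match rest with | q :: _ => q.1 | [] => n - 1)] :: windowsB n rest
  | _ => []

def get_traps_alt (height : List Int) : List (List Int) :=
  let ext := ((PySem.List.enumerate (height.zip height.tail)).foldl extStep (none, [])).2
  let ext2 := match ext with
    | q :: t => if q.2 then t else q :: t
    | [] => []
  windowsB ((height.length : Int)) ext2

-- ===== PRECONDITION & SPEC =====
def Spec_get_traps (height : List Int) (out : List (List Int)) : Prop := out = get_traps_alt height
instance (height : List Int) (out : List (List Int)) : Decidable (Spec_get_traps height out) := by unfold Spec_get_traps; infer_instance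

-- ===== CLAIM (what is proved, stated in full; the proofs are below) =====
def Claim_equal_get_traps : Prop := ∀ (height : List Int), Dom_get_traps height → Spec_get_traps height (get_traps height)

-- ===== LEMMAS AND PROOFS =====

-- next strict down-step at or after j (none if the rest is non-descending)
def nd (h : List Int) (j : Nat) : Option Nat :=
  if j < h.length - 1 then
    if h.getD (j+1) 0 < h.getD j 0 then some j else nd h (j+1)
  else none
termination_by h.length - 1 - j
decreasing_by omega

-- next strict up-step at or after j
def nu (h : List Int) (j : Nat) : Option Nat :=
  if j < h.length - 1 then
    if h.getD (j+1) 0 > h.getD j 0 then some j else nu h (j+1)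
  else none
termination_by h.length - 1 - j
decreasing_by omega

theorem nd_mem (h : List Int) (j : Nat) {p : Nat} (hp : nd h j = some p) :
    j ≤ p ∧ p < h.length - 1 ∧ h.getD (p+1) 0 < h.getD p 0 := by
  fun_induction nd h j with
  | case1 j hj hlt => simp_all
  | case2 j hj hlt ih => have := ih hp; omega
  | case3 j hj => simp_all

theorem nu_mem (h : List Int) (j : Nat) {v : Nat} (hv : nu h j = some v) :
    j ≤ v ∧ v < h.length - 1 ∧ h.getD (v+1) 0 > h.getD v 0 := by
  fun_induction nu h j with
  | case1 j hj hlt => simp_all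
  | case2 j hj hlt ih => have := ih hv; omega
  | case3 j hj => simp_all

-- the alternating extrema chain, as mutually recursive peak/valley searches
mutual
def chD (h : List Int) (j : Nat) : List (Int × Bool) :=
  match hm : nd h j with
  | none => []
  | some p => ((p : Int), false) :: chU h (p+1)
termination_by h.length - j
decreasing_by have := nd_mem h j hm; omega

def chU (h : List Int) (j : Nat) : List (Int × Bool) :=
  match hm : nu h j with
  | none => []
  | some v => ((v : Int), true) :: chD h (v+1)
termination_by h.length - j
decreasing_by have := nu_mem h j hm; omega
end

theorem chD_none (h : List Int) (j : Nat) (hnd : nd h j = none) : chD h j = [] := by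
  rw [chD]; split <;> simp_all

theorem chD_some (h : List Int) (j : Nat) {p : Nat} (hnd : nd h j = some p) :
    chD h j = ((p : Int), false) :: chU h (p+1) := by
  rw [chD]; split <;> simp_all

theorem chU_none (h : List Int) (j : Nat) (hnu : nu h j = none) : chU h j = [] := by
  rw [chU]; split <;> simp_all

theorem chU_some (h : List Int) (j : Nat) {v : Nat} (hnu : nu h j = some v) :
    chU h j = ((v : Int), true) :: chD h (v+1) := by
  rw [chU]; split <;> simp_all

theorem chD_congr (h : List Int) (j j' : Nat) (he : nd h j = nd h j') : chD h j = chD h j' := by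
  cases hm : nd h j' with
  | none => rw [chD_none h j (he.trans hm), chD_none h j' hm]
  | some p => rw [chD_some h j (he.trans hm), chD_some h j' hm]

theorem chU_congr (h : List Int) (j j' : Nat) (he : nu h j = nu h j') : chU h j = chU h j' := by
  cases hm : nu h j' with
  | none => rw [chU_none h j (he.trans hm), chU_none h j' hm]
  | some v => rw [chU_some h j (he.trans hm), chU_some h j' hm]

theorem climbA_eq (h : List Int) (j : Nat) (hj : j ≤ h.length - 1) :
    climbA h j = (nd h j).getD (h.length - 1) := by
  fun_induction climbA h j with
  | case1 j hc ih =>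
      rw [nd, if_pos hc.1, if_neg (by omega)]
      exact ih (by omega)
  | case2 j hc =>
      rw [nd]
      by_cases h1 : j < h.length - 1
      · rw [if_pos h1, if_pos (by omega)]; simp only [Option.getD_some]
      · rw [if_neg h1]; simp only [Option.getD_none]; omega

theorem descA_eq (h : List Int) (j : Nat) (hj : j ≤ h.length - 1) :
    descA h j = (nu h j).getD (h.length - 1) := by
  fun_induction descA h j with
  | case1 j hc ih =>
      rw [nu, if_pos hc.1, if_neg (by omega)]
      exact ih (by omega)
  | case2 j hc =>
      rw [nu]
      by_cases h1 : j < h.length - 1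
      · rw [if_pos h1, if_pos (by omega)]; simp only [Option.getD_some]
      · rw [if_neg h1]; simp only [Option.getD_none]; omega

-- nd/nu skip an index that is not a down/up step
theorem nd_succ (h : List Int) (j : Nat) (hj : j < h.length - 1)
    (hs : ¬ h.getD (j+1) 0 < h.getD j 0) : nd h j = nd h (j+1) := by
  rw [nd, if_pos hj, if_neg hs]

theorem nu_succ (h : List Int) (j : Nat) (hj : j < h.length - 1)
    (hs : ¬ h.getD (j+1) 0 > h.getD j 0) : nu h j = nu h (j+1) := by
  rw [nu, if_pos hj, if_neg hs]

-- ===== A-side: loopA computes the windows of the chain =====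
theorem loopA_eq (h : List Int) (fuel : Nat) : ∀ (j : Nat), j ≤ h.length - 1 →
    h.length - j < fuel → ∀ (acc : List (List Int)),
    loopA h fuel j acc = acc ++ windowsB (h.length : Int) (chD h j) := by
  induction fuel with
  | zero => intro j _ hf; omega
  | succ fuel ih =>
    intro j hj hf acc
    rw [loopA, climbA_eq h j hj]
    cases hnd : nd h j with
    | none =>
        rw [chD_none h j hnd]
        simp only [Option.getD_none]
        rw [if_pos (by omega : (((h.length - 1 : Nat) : Int)) > (h.length : Int) - 3)]
        simp [windowsB]
    | some p =>
        obtain ⟨hjp, hpn, hdown⟩ := nd_mem h j hnd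
        rw [chD_some h j hnd]
        simp only [Option.getD_some]
        by_cases hbr : ((p : Int) > (h.length : Int) - 3)
        · -- p = len-2: no up-step can follow, chain has a single peak, no window
          rw [if_pos hbr]
          have hnu : nu h (p+1) = none := by
            cases h2 : nu h (p+1) with
            | none => rfl
            | some v => have := nu_mem h (p+1) h2; omega
          rw [chU_none h (p+1) hnu]
          simp [windowsB]
        · rw [if_neg hbr]
          rw [descA_eq h p (by omega), nu_succ h p hpn (by omega)]
          cases hnu : nu h (p+1) with
          | none =>
              rw [chU_none h (p+1) hnu]
              simp only [Option.getD_none]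
              simp [windowsB]
          | some v =>
              obtain ⟨hpv, hvn, hup⟩ := nu_mem h (p+1) hnu
              rw [chU_some h (p+1) hnu]
              simp only [Option.getD_some]
              rw [if_neg (by omega)]
              rw [climbA_eq h v (by omega), nd_succ h v hvn (by omega)]
              cases hnd2 : nd h (v+1) with
              | none =>
                  simp only [Option.getD_none]
                  rw [ih (h.length - 1) (by omega) (by omega)]
                  rw [chD_none h (h.length - 1) (by rw [nd, if_neg (by omega)])]
                  rw [chD_none h (v+1) hnd2]
                  simp only [windowsB, List.append_nil]
                  have hc : ((h.length - 1 : Nat) : Int) = (h.length : Int) - 1 := by omega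
                  simp [hc]
              | some p' =>
                  obtain ⟨hvp', hp'n, hdown'⟩ := nd_mem h (v+1) hnd2
                  simp only [Option.getD_some]
                  rw [ih p' (by omega) (by omega)]
                  have he : chD h p' = chD h (v+1) := chD_congr h p' (v+1) (by
                    rw [hnd2, nd, if_pos hp'n, if_pos hdown'])
                  rw [he, chD_some h (v+1) hnd2]
                  simp [windowsB]

-- ===== B-side: the fold computes the chain =====
-- the emitted extrema of B's fold, as a plain recursion over the enumerated pairs
def F (last : Option Bool) : List (Int × Int × Int) → List (Int × Bool)
  | [] => []
  | p :: t =>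
      if p.2.2 ≠ p.2.1 then
        let s : Bool := decide (p.2.2 > p.2.1)
        if last ≠ some s then (p.1, s) :: F (some s) t else F last t
      else F last t

theorem foldl_extStep (l : List (Int × Int × Int)) (last : Option Bool) (acc : List (Int × Bool)) :
    (l.foldl extStep (last, acc)).2 = acc ++ F last l := by
  induction l generalizing last acc with
  | nil => simp [F]
  | cons p t ih =>
      simp only [List.foldl_cons, extStep, F]
      by_cases h1 : p.2.2 ≠ p.2.1
      · rw [if_pos h1, if_pos h1]
        by_cases h2 : last ≠ some (decide (p.2.2 > p.2.1))
        · rw [if_pos h2, if_pos h2, ih]; simp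
        · rw [if_neg h2, if_neg h2, ih]
      · rw [if_neg h1, if_neg h1, ih]

-- the enumerated adjacent pairs from position j on
def pairs (h : List Int) (j : Nat) : List (Int × Int × Int) :=
  if j < h.length - 1 then ((j : Int), h.getD j 0, h.getD (j+1) 0) :: pairs h (j+1) else []
termination_by h.length - 1 - j
decreasing_by omega

theorem length_zip_tail (h : List Int) : (h.zip h.tail).length = h.length - 1 := by
  cases h with
  | nil => simp
  | cons a t => simp

theorem pairs_eq_drop (h : List Int) (j : Nat) :
    pairs h j = (PySem.List.enumerate (h.zip h.tail)).drop j := by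
  fun_induction pairs h j with
  | case1 j hj ih =>
      have hlen : (PySem.List.enumerate (h.zip h.tail)).length = h.length - 1 := by
        rw [PySem.List.length_enumerate, length_zip_tail]
      rw [List.drop_eq_getElem_cons (by omega), ih]
      congr 1
      have hjz : j < (h.zip h.tail).length := by rw [length_zip_tail]; omega
      rw [PySem.List.getElem_enumerate]
      have hjh : j < h.length := by omega
      have hjt : j < h.tail.length := by cases h with | nil => simp at hjh; | cons a t => simp at hjz ⊢; omega
      have hz : (h.zip h.tail)[j]'hjz = (h[j]'hjh, h.tail[j]'hjt) := List.getElem_zip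
      rw [hz]
      have h2 : h.tail[j]'hjt = h[j+1]'(by cases h with | nil => simp at hjh | cons a t => simp at hjt ⊢; omega) := by
        cases h with
        | nil => simp at hjh
        | cons a t => simp
      rw [h2]
      rw [List.getD_eq_getElem h 0 hjh, List.getD_eq_getElem h 0 (by cases h with | nil => simp at hjh | cons a t => simp at hjt ⊢; omega)]
      simp
  | case2 j hj =>
      have hlen : (PySem.List.enumerate (h.zip h.tail)).length = h.length - 1 := by
        rw [PySem.List.length_enumerate, length_zip_tail]
      rw [List.drop_eq_nil_of_le (by omega)]

theorem F_chain (h : List Int) (j : Nat) :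
    F (some false) (pairs h j) = chU h j ∧ F (some true) (pairs h j) = chD h j := by
  fun_induction pairs h j with
  | case1 j hj ih =>
      constructor
      · -- last = down: skip downs and flats, emit first up
        show F (some false) (((j:Int), h.getD j 0, h.getD (j+1) 0) :: pairs h (j+1)) = chU h j
        rw [F]
        by_cases h1 : h.getD (j+1) 0 ≠ h.getD j 0
        · rw [if_pos h1]
          by_cases h2 : h.getD (j+1) 0 > h.getD j 0
          · simp only [h2, decide_true]
            rw [if_pos (by simp), ih.2]
            rw [chU_some h j (by rw [nu, if_pos hj, if_pos h2])]
          · simp only [h2, decide_false]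
            rw [if_neg (by simp), ih.1, chU_congr h j (j+1) (nu_succ h j hj h2)]
        · rw [if_neg h1, ih.1, chU_congr h j (j+1) (nu_succ h j hj (by omega))]
      · show F (some true) (((j:Int), h.getD j 0, h.getD (j+1) 0) :: pairs h (j+1)) = chD h j
        rw [F]
        by_cases h1 : h.getD (j+1) 0 ≠ h.getD j 0
        · rw [if_pos h1]
          by_cases h2 : h.getD (j+1) 0 > h.getD j 0
          · simp only [h2, decide_true]
            rw [if_neg (by simp), ih.2, chD_congr h j (j+1) (nd_succ h j hj (by omega))]
          · simp only [h2, decide_false]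
            rw [if_pos (by simp), ih.1]
            rw [chD_some h j (by rw [nd, if_pos hj, if_pos (by omega)])]
        · rw [if_neg h1, ih.2, chD_congr h j (j+1) (nd_succ h j hj (by omega))]
  | case2 j hj =>
      constructor
      · show F (some false) [] = chU h j
        rw [F, chU_none h j (by rw [nu, if_neg hj])]
      · show F (some true) [] = chD h j
        rw [F, chD_none h j (by rw [nd, if_neg hj])]

theorem F_none_drop (h : List Int) (j : Nat) :
    (match F none (pairs h j) with
     | q :: t => if q.2 then t else q :: t
     | [] => []) = chD h j := by
  fun_induction pairs h j with
  | case1 j hj ih =>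
      show (match F none (((j:Int), h.getD j 0, h.getD (j+1) 0) :: pairs h (j+1)) with
            | q :: t => if q.2 then t else q :: t
            | [] => ([] : List (Int × Bool))) = chD h j
      rw [F]
      by_cases h1 : h.getD (j+1) 0 ≠ h.getD j 0
      · rw [if_pos h1]
        by_cases h2 : h.getD (j+1) 0 > h.getD j 0
        · simp only [h2, decide_true]
          rw [if_pos (by simp)]
          simp only [if_true]
          rw [(F_chain h (j+1)).2, chD_congr h j (j+1) (nd_succ h j hj (by omega))]
        · simp only [h2, decide_false]
          rw [if_pos (by simp)]
          simp only [Bool.false_eq_true, if_false]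
          rw [(F_chain h (j+1)).1]
          rw [chD_some h j (by rw [nd, if_pos hj, if_pos (by omega)])]
      · rw [if_neg h1, ih, chD_congr h j (j+1) (nd_succ h j hj (by omega))]
  | case2 j hj =>
      show (match F none [] with
            | q :: t => if q.2 then t else q :: t
            | [] => ([] : List (Int × Bool))) = chD h j
      rw [F, chD_none h j (by rw [nd, if_neg hj])]

-- ===== VERDICT (by name: the statement is the Claim_ definition above) =====
theorem get_traps_spec : Claim_equal_get_traps := by
  intro height _
  show get_traps height = get_traps_alt height
  rw [get_traps, get_traps_alt]
  rw [loopA_eq height (height.length + 1) 0 (by omega) (by omega)]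
  simp only [List.nil_append]
  congr 1
  rw [foldl_extStep]
  simp only [List.nil_append]
  rw [show PySem.List.enumerate (height.zip height.tail) = pairs height 0 from by
    rw [pairs_eq_drop height 0, List.drop_zero]]
  exact (F_none_drop height 0).symm
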